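-- pv_equiv track=rewrite | github.com/benbendaisy/CommunicationCodes | python_module/examples/3202_Find_the_Maximum_Length_of_Valid_Subsequence_II.py | maximumLength2
-- ===== SOURCE A (Python) =====
-- from typing import List
--
-- def maximumLength2(nums: List[int], k: int) -> int:
--     dp = [[0] * k for _ in range(k)]
--     res = 0
--     for num in nums:
--         num %= k
--         for prev in range(k):
--             dp[prev][num] = dp[num][prev] + 1
--             res = max(res, dp[prev][num])
--     return res
-- ===== SOURCE B (Python) =====
-- from typing import List
--
-- def maximumLength2(nums: List[int], k: int) -> int:
--     # Greedy periodic-pattern matching instead of DP: collect the positions of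
--     # each residue once, then for each ordered residue pair (x, y) greedily
--     # build the longest subsequence with residue pattern x, y, x, y, ... by
--     # two-pointer merging the two position lists (greedy is optimal when
--     # matching a subsequence against a fixed periodic pattern).  Pairs with a
--     # residue that never occurs contribute at most 1 <= count(x) and are
--     # skipped.
--     pos = {}
--     for i, num in enumerate(nums):
--         pos.setdefault(num % k, []).append(i)
--     res = 0
--     for x in range(k):
--         if x not in pos:
--             continue
--         px = pos[x]
--         for y, py in pos.items():
--             a, b, i, j, cur, cnt = px, py, 0, 0, -1, 0
--             while True:
--                 while i < len(a) and a[i] <= cur: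
--                     i += 1
--                 if i == len(a):
--                     break
--                 cur = a[i]
--                 cnt += 1
--                 a, b, i, j = b, a, j, i + 1
--             res = max(res, cnt)
--     return res
-- ===== Notes on version B (the rewrite author's own statement) =====
-- stated objective: alternative
-- what changed: Replaced the single-pass k x k DP table (dp[prev][num] = dp[num][prev]+1) with greedy periodic-pattern matching: positions of each residue are collected once, then for each ordered pair of residues actually present the longest subsequence with residue pattern x,y,x,y,... is counted by a two-pointer merge of the two position lists; no k x k table is allocated.
import Mathlib
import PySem

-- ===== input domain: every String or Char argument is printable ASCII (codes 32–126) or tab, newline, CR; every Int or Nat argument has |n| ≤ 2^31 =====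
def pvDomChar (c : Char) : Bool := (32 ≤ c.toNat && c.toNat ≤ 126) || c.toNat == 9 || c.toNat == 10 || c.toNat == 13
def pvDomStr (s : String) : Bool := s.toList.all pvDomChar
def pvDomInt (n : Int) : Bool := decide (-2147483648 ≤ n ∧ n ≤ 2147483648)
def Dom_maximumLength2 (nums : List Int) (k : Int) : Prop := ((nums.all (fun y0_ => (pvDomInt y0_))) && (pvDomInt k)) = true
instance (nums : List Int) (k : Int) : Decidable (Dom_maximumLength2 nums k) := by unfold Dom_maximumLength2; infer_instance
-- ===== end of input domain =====

-- B replaces A's single-pass k×k DP table with greedy periodic-pattern matching: per ordered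
-- pair of present residues, a two-pointer merge of the two position lists (no DP table).

-- ===== PORT A =====
-- inner loop body: dp[prev][num] = dp[num][prev] + 1; res = max(res, dp[prev][num])
-- (indices here are always in [0,k) under Pre_, so .getD/.set with .toNat are exact Python indexing)
def pvAInner (r : Int) (st : List (List Int) × Int) (prev : Int) : List (List Int) × Int :=
  let v := (st.1.getD r.toNat []).getD prev.toNat 0 + 1
  (st.1.set prev.toNat ((st.1.getD prev.toNat []).set r.toNat v), max st.2 v)

-- body of 'for num in nums': num %= k; for prev in range(k): …
def pvAStep (k : Int) (st : List (List Int) × Int) (num : Int) : List (List Int) × Int :=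
  (PySem.List.pyRange 0 k 1).foldl (pvAInner (PySem.Int.mod num k)) st

def maximumLength2 (nums : List Int) (k : Int) : Int :=
  (nums.foldl (pvAStep k)
    ((PySem.List.pyRange 0 k 1).map (fun _ => PySem.List.pyRepeat [(0 : Int)] k), 0)).2

-- ===== PORT B =====
-- helper: the two-pointer greedy merge loop ('while True: ... a, b, i, j = b, a, j, i + 1'),
-- with the pointer suffixes of the two position lists as the recursion state
def pvAltc (a b : List Int) (cur : Int) : Int :=
  match h : a.dropWhile (fun p => decide (p ≤ cur)) with
  | [] => 0
  | p :: t => 1 + pvAltc b t p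
termination_by a.length + b.length
decreasing_by
  have hle := List.length_dropWhile_le (fun p => decide (p ≤ cur)) a
  rw [h] at hle
  simp at hle
  omega

-- pos = {}; for i, num in enumerate(nums): pos.setdefault(num % k, []).append(i)
-- for x in range(k): if x in pos: for y, py in pos.items(): res = max(res, <greedy merge>)
def maximumLength2_alt (nums : List Int) (k : Int) : Int :=
  let pos := (PySem.List.enumerate nums).foldl
    (fun d p => d.modify (PySem.Int.mod p.2 k) ([] : List Int) (fun l => l ++ [p.1]))
    PySem.Dict.empty
  (PySem.List.pyRange 0 k 1).foldl (fun res x =>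
    if pos.contains x then
      pos.items.foldl (fun res yp => max res (pvAltc (pos.getD x []) yp.2 (-1))) res
    else res) 0

-- ===== PRECONDITION & SPEC =====
-- Pre_ excludes only k = 0 with non-empty nums, where Python A raises ZeroDivisionError on 'num %= k'.
def Pre_maximumLength2 (nums : List Int) (k : Int) : Prop := k ≠ 0 ∨ nums = []
instance (nums : List Int) (k : Int) : Decidable (Pre_maximumLength2 nums k) := by unfold Pre_maximumLength2; infer_instance

def pvWitness_maximumLength2 : List Int × Int := ([1, 2, 3, 4, 5], 3)

def Spec_maximumLength2 (nums : List Int) (k : Int) (out : Int) : Prop := out = maximumLength2_alt nums k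
instance (nums : List Int) (k : Int) (out : Int) : Decidable (Spec_maximumLength2 nums k out) := by unfold Spec_maximumLength2; infer_instance

-- ===== CLAIM (what is proved, stated in full; the proofs are below) =====
def Claim_equal_maximumLength2 : Prop := ∀ (nums : List Int) (k : Int), Dom_maximumLength2 nums k → Pre_maximumLength2 nums k → Spec_maximumLength2 nums k (maximumLength2 nums k)

-- ===== LEMMAS AND PROOFS =====

-- Per-target model (shared by both directions of the proof): for a fixed target residue t,
-- a function on residues (cell r = longest valid subsequence of the prefix ending in residue r)
-- together with the running max of all values written during the pass.
def pvMStep (k t : Int) (st : (Int → Int) × Int) (num : Int) : (Int → Int) × Int :=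
  let r := PySem.Int.mod num k
  let v := st.1 (PySem.Int.mod (t - r) k) + 1
  (fun j => if j = r then v else st.1 j, max st.2 v)

def pvM (k t : Int) (l : List Int) : (Int → Int) × Int := l.foldl (pvMStep k t) (fun _ => 0, 0)

def pvGet2 (dp : List (List Int)) (p c : Nat) : Int := (dp.getD p []).getD c 0

-- the overall answer according to a family of per-target states
def pvR (k : Int) (F : Int → (Int → Int) × Int) : Int :=
  (PySem.List.pyRange 0 k 1).foldl (fun a t => max a ((F t).2)) 0

-- A's state (table, res) realises the family F of per-target model states
def pvRel (k : Int) (st : List (List Int) × Int) (F : Int → (Int → Int) × Int) : Prop :=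
  st.1.length = k.toNat ∧
  (∀ p : Nat, p < k.toNat → (st.1.getD p []).length = k.toNat) ∧
  (∀ p c : Nat, p < k.toNat → c < k.toNat →
      pvGet2 st.1 p c = (F (PySem.Int.mod ((p : Int) + (c : Int)) k)).1 (c : Int)) ∧
  st.2 = pvR k F

theorem pv_getD_set {α : Type} (l : List α) (i j : Nat) (v d : α) :
    (l.set i v).getD j d = if i = j ∧ i < l.length then v else l.getD j d := by
  simp only [List.getD_eq_getElem?_getD, List.getElem?_set]
  split_ifs <;> simp_all
  omega

theorem pv_foldl_max_start {α : Type} (g : α → Int) (ts : List α) (a : Int) :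
    ∀ b : Int, ts.foldl (fun x t => max x (g t)) (max a b) = max a (ts.foldl (fun x t => max x (g t)) b) := by
  induction ts with
  | nil => intro b; simp
  | cons t ts ih => intro b; simpa [max_assoc] using ih (max b (g t))

theorem pv_foldl_max_distrib {α : Type} (m w : α → Int) (ts : List α) :
    ∀ a b : Int, ts.foldl (fun x t => max x (max (m t) (w t))) (max a b)
      = max (ts.foldl (fun x t => max x (m t)) a) (ts.foldl (fun x t => max x (w t)) b) := by
  induction ts with
  | nil => intro a b; simp
  | cons t ts ih => intro a b; simpa [max_max_max_comm] using ih (max a (m t)) (max b (w t))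

theorem pv_shift_perm (k r : Int) (hk : 0 < k) :
    ((PySem.List.pyRange 0 k 1).map (fun p => PySem.Int.mod (p + r) k)).Perm (PySem.List.pyRange 0 k 1) := by
  apply (List.perm_ext_iff_of_nodup ?_ (PySem.List.nodup_pyRange_one 0 k)).2
  · intro x
    simp only [List.mem_map, PySem.List.mem_pyRange_one]
    constructor
    · rintro ⟨p, ⟨hp0, hpk⟩, rfl⟩
      exact ⟨PySem.Int.mod_nonneg _ hk, PySem.Int.mod_lt _ hk⟩
    · rintro ⟨hx0, hxk⟩
      refine ⟨PySem.Int.mod (x - r) k, ⟨PySem.Int.mod_nonneg _ hk, PySem.Int.mod_lt _ hk⟩, ?_⟩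
      rw [PySem.Int.mod_eq_emod_of_pos hk, PySem.Int.mod_eq_emod_of_pos hk,
        Int.emod_add_emod, sub_add_cancel, Int.emod_eq_of_lt hx0 hxk]
  · refine List.Nodup.map_on ?_ (PySem.List.nodup_pyRange_one 0 k)
    intro x hx y hy hxy
    rw [PySem.List.mem_pyRange_one] at hx hy
    rw [PySem.Int.mod_eq_emod_of_pos hk, PySem.Int.mod_eq_emod_of_pos hk] at hxy
    have h2 : x % k = y % k := Int.ModEq.add_right_cancel' r hxy
    rwa [Int.emod_eq_of_lt hx.1 hx.2, Int.emod_eq_of_lt hy.1 hy.2] at h2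

-- folding max of g over a mod-shifted enumeration of the residues equals folding over the residues
theorem pv_foldl_max_shift (k r : Int) (hk : 0 < k) (w : Int → Int) (a : Int) :
    (PySem.List.pyRange 0 k 1).foldl (fun x p => max x (w (PySem.Int.mod (p + r) k))) a
      = (PySem.List.pyRange 0 k 1).foldl (fun x t => max x (w t)) a := by
  have h := (pv_shift_perm k r hk).foldl_eq (f := fun x t => max x (w t))
    (rcomm := ⟨fun b x y => max_right_comm b (w x) (w y)⟩) (b := a)
  simpa [List.foldl_map] using h

theorem pv_R_nonneg (k : Int) (F : Int → (Int → Int) × Int) : 0 ≤ pvR k F :=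
  (PySem.List.le_foldl_max_int (PySem.List.pyRange 0 k 1) (fun t => (F t).2) 0).1

-- mod identity used to line up the per-target indices (symbolic k, via emod)
theorem pv_mod_shift_cancel (k x r : Int) (hk : 0 < k) (h0 : 0 ≤ x) (hxk : x < k) :
    PySem.Int.mod (PySem.Int.mod (x + r) k - r) k = x := by
  rw [PySem.Int.mod_eq_emod_of_pos hk, PySem.Int.mod_eq_emod_of_pos hk,
    Int.emod_sub_emod, add_sub_cancel_right, Int.emod_eq_of_lt h0 hxk]

-- ===== A side: A's result is pvR of the per-target model family =====

-- the inner 'for prev in range(m)' loop: all reads are from the ORIGINAL table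
theorem pv_inner (k r : Int) (hrk : r.toNat < k.toNat)
    (dp : List (List Int)) (res : Int)
    (hlen : dp.length = k.toNat) (hrow : ∀ p : Nat, p < k.toNat → (dp.getD p []).length = k.toNat) :
    ∀ m : Nat, m ≤ k.toNat →
      (((List.range m).foldl (fun st (j : Nat) => pvAInner r st (j : Int)) (dp, res)).1.length = k.toNat) ∧
      (∀ p : Nat, p < k.toNat →
        ((((List.range m).foldl (fun st (j : Nat) => pvAInner r st (j : Int)) (dp, res)).1.getD p []).length = k.toNat)) ∧
      (∀ p c : Nat, p < k.toNat → c < k.toNat →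
        pvGet2 ((List.range m).foldl (fun st (j : Nat) => pvAInner r st (j : Int)) (dp, res)).1 p c
          = if c = r.toNat ∧ p < m then pvGet2 dp r.toNat p + 1 else pvGet2 dp p c) ∧
      ((List.range m).foldl (fun st (j : Nat) => pvAInner r st (j : Int)) (dp, res)).2
          = (List.range m).foldl (fun a p => max a (pvGet2 dp r.toNat p + 1)) res := by
  intro m
  induction m with
  | zero =>
    intro _
    refine ⟨hlen, hrow, ?_, rfl⟩
    intro p c _ _
    rw [if_neg (by omega)]
    rfl
  | succ m ih =>
    intro hm1
    obtain ⟨ih1, ih2, ih3, ih4⟩ := ih (by omega)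
    rw [List.range_succ, List.foldl_append, List.foldl_cons, List.foldl_nil] at *
    set S := (List.range m).foldl (fun st (j : Nat) => pvAInner r st (j : Int)) (dp, res) with hS
    have hv : (S.1.getD r.toNat []).getD ((m : Int)).toNat 0 = pvGet2 dp r.toNat m := by
      have h3 := ih3 r.toNat m hrk (by omega)
      rw [if_neg (by omega)] at h3
      simpa [pvGet2] using h3
    simp only [pvAInner, Int.toNat_natCast] at *
    rw [hv]
    refine ⟨by simpa using ih1, ?_, ?_, by rw [ih4]; simp [List.foldl_append]⟩
    · intro p hp
      rw [pv_getD_set]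
      split_ifs with h
      · rw [List.length_set]; exact ih2 m (by omega)
      · exact ih2 p hp
    · intro p c hp hc
      simp only [pvGet2, pv_getD_set]
      by_cases hpm : m = p
      · subst hpm
        rw [if_pos ⟨rfl, by omega⟩, pv_getD_set]
        have h3 := ih3 m c hp hc
        rw [if_neg (by omega)] at h3
        by_cases hcr : r.toNat = c
        · rw [if_pos ⟨hcr, by rw [ih2 m hp]; omega⟩, if_pos ⟨hcr.symm, by omega⟩]
        · rw [if_neg (by intro h; exact hcr h.1), if_neg (by intro h; exact hcr h.1.symm)]
          simpa [pvGet2] using h3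
      · rw [if_neg (by intro h; exact hpm h.1)]
        have h3 := ih3 p c hp hc
        simp only [pvGet2] at h3
        rw [h3]
        by_cases hcr : c = r.toNat
        · by_cases hpm' : p < m
          · rw [if_pos ⟨hcr, hpm'⟩, if_pos ⟨hcr, by omega⟩]
          · rw [if_neg (by intro h; exact hpm' h.2), if_neg (by intro h; omega)]
        · rw [if_neg (by intro h; exact hcr h.1), if_neg (by intro h; exact hcr h.1)]

-- one outer iteration of A preserves the relation with the per-target family
theorem pv_astep (k num : Int) (hk : 0 < k) (st : List (List Int) × Int)
    (F : Int → (Int → Int) × Int) (h : pvRel k st F) :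
    pvRel k (pvAStep k st num) (fun t => pvMStep k t (F t) num) := by
  obtain ⟨dp, res⟩ := st
  obtain ⟨h1, h2, h3, h4⟩ := h
  simp only [pvRel] at *
  have hr0 : 0 ≤ PySem.Int.mod num k := PySem.Int.mod_nonneg _ hk
  have hrk : PySem.Int.mod num k < k := PySem.Int.mod_lt _ hk
  set r := PySem.Int.mod num k with hr
  have hrn : r.toNat < k.toNat := by omega
  have hcast : (r.toNat : Int) = r := Int.toNat_of_nonneg hr0
  have hfold : pvAStep k (dp, res) num = (List.range k.toNat).foldl (fun s (j : Nat) => pvAInner r s (j : Int)) (dp, res) := by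
    rw [pvAStep, PySem.List.pyRange_one, List.foldl_map]
    simp only [zero_add, sub_zero]
    rfl
  obtain ⟨g1, g2, g3, g4⟩ := pv_inner k r hrn dp res h1 h2 k.toNat le_rfl
  have hw : ∀ p : Nat, p < k.toNat →
      pvGet2 dp r.toNat p + 1
        = (F (PySem.Int.mod ((p : Int) + r) k)).1 (PySem.Int.mod (PySem.Int.mod ((p : Int) + r) k - r) k) + 1 := by
    intro p hp
    rw [pv_mod_shift_cancel k (p : Int) r hk (by omega) (by omega)]
    rw [h3 r.toNat p hrn hp, hcast, add_comm r (p : Int)]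
  refine ⟨by rw [hfold]; exact g1, by rw [hfold]; exact g2, ?_, ?_⟩
  · intro p c hp hc
    rw [hfold, g3 p c hp hc]
    simp only [pvMStep]
    by_cases hcr : c = r.toNat
    · subst hcr
      rw [if_pos ⟨rfl, hp⟩, if_pos hcast]
      rw [hcast]
      exact hw p hp
    · rw [if_neg (fun hh => hcr hh.1), if_neg (by
        intro hh
        apply hcr
        have hcc : ((c : Nat) : Int) = ((r.toNat : Nat) : Int) := by rw [hcast]; exact hh
        exact_mod_cast hcc)]
      exact h3 p c hp hc
  · rw [hfold, g4]
    have hcongr : (List.range k.toNat).foldl (fun a p => max a (pvGet2 dp r.toNat p + 1)) res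
        = (List.range k.toNat).foldl (fun a (p : Nat) => max a
            ((F (PySem.Int.mod ((0:Int) + (p : Int) + r) k)).1 (PySem.Int.mod (PySem.Int.mod ((0:Int) + (p : Int) + r) k - r) k) + 1)) res := by
      apply PySem.List.foldl_congr_mem
      intro a b hb
      rw [List.mem_range] at hb
      rw [hw b hb]
      norm_num
    rw [hcongr]
    have hmap : (List.range k.toNat).foldl (fun a (p : Nat) => max a
          ((F (PySem.Int.mod ((0:Int) + (p : Int) + r) k)).1 (PySem.Int.mod (PySem.Int.mod ((0:Int) + (p : Int) + r) k - r) k) + 1)) res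
        = (PySem.List.pyRange 0 k 1).foldl (fun a p => max a
            ((F (PySem.Int.mod (p + r) k)).1 (PySem.Int.mod (PySem.Int.mod (p + r) k - r) k) + 1)) res := by
      rw [PySem.List.pyRange_one, List.foldl_map]
      simp
    rw [hmap, pv_foldl_max_shift k r hk (fun t => (F t).1 (PySem.Int.mod (t - r) k) + 1) res]
    have hres0 : (0:Int) ≤ res := h4 ▸ pv_R_nonneg k F
    have hsplit := pv_foldl_max_start (fun t => (F t).1 (PySem.Int.mod (t - r) k) + 1) (PySem.List.pyRange 0 k 1) res 0
    rw [max_eq_left hres0] at hsplit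
    rw [hsplit, h4]
    have hdist := pv_foldl_max_distrib (fun t => (F t).2) (fun t => (F t).1 (PySem.Int.mod (t - r) k) + 1)
      (PySem.List.pyRange 0 k 1) 0 0
    simp only [max_self] at hdist
    simp only [pvR, pvMStep, ← hdist, ← hr]

theorem pv_aloop (k : Int) (hk : 0 < k) (l : List Int) :
    ∀ (st : List (List Int) × Int) (F : Int → (Int → Int) × Int), pvRel k st F →
      pvRel k (l.foldl (pvAStep k) st) (fun t => l.foldl (pvMStep k t) (F t)) := by
  induction l with
  | nil => intro st F h; exact h
  | cons num l ih => intro st F h; exact ih _ _ (pv_astep k num hk st F h)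

theorem pv_rel_init (k : Int) :
    pvRel k ((PySem.List.pyRange 0 k 1).map (fun _ => PySem.List.pyRepeat [(0 : Int)] k), 0)
      (fun _ => (fun _ => 0, 0)) := by
  have hrep : PySem.List.pyRepeat [(0 : Int)] k = List.replicate k.toNat 0 :=
    PySem.List.pyRepeat_singleton 0 k
  have hconst : (PySem.List.pyRange 0 k 1).map (fun _ => PySem.List.pyRepeat [(0 : Int)] k)
      = List.replicate k.toNat (List.replicate k.toNat (0 : Int)) := by
    rw [hrep, List.map_const', PySem.List.length_pyRange_one]
    norm_num
  refine ⟨by rw [hconst]; exact List.length_replicate, ?_, ?_, ?_⟩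
  · intro p hp
    rw [hconst, List.getD_eq_getElem?_getD, List.getElem?_replicate, if_pos hp]
    exact List.length_replicate
  · intro p c hp hc
    simp [pvGet2, hp, hc]
  · show (0 : Int) = pvR k _
    rw [pvR]
    have : ∀ (l : List Int) (a : Int), 0 ≤ a → l.foldl (fun x (_ : Int) => max x ((0:Int))) a = a := by
      intro l
      induction l with
      | nil => intro a _; rfl
      | cons x l ih =>
        intro a ha
        rw [List.foldl_cons, max_eq_left ha]
        exact ih a ha
    exact (this (PySem.List.pyRange 0 k 1) 0 le_rfl).symm

-- ===== B side: greedy counters and their relation to the per-target model =====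

-- greedy counter of pattern x,y,x,y,…: the expected residue is x when the count is even, y when odd
def pvGc (k x y : Int) (l : List Int) : Int :=
  l.foldl (fun c num => if PySem.Int.mod num k = (if c % 2 = 0 then x else y) then c + 1 else c) 0

def pvOdd0 (n : Int) : Int := if n % 2 = 0 then (if n = 0 then 0 else n - 1) else n
def pvEven0 (n : Int) : Int := if n % 2 = 0 then n else n - 1
def pvPt (k t r : Int) : Int := PySem.Int.mod (t - r) k

-- value of the per-target cell ending in residue r, expressed through the two greedy counters
def pvCell (k t : Int) (l : List Int) (r : Int) : Int :=
  max (pvOdd0 (pvGc k r (pvPt k t r) l)) (pvEven0 (pvGc k (pvPt k t r) r l))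

def pvCellMax (k t : Int) (l : List Int) : Int :=
  (PySem.List.pyRange 0 k 1).foldl (fun a r => max a (pvCell k t l r)) 0

-- generic bounds for max-folds
theorem pv_fm_le {α : Type} (l : List α) (f : α → Int) :
    ∀ a B : Int, a ≤ B → (∀ x ∈ l, f x ≤ B) → l.foldl (fun acc x => max acc (f x)) a ≤ B := by
  induction l with
  | nil => intro a B ha _; exact ha
  | cons x l ih =>
    intro a B ha hf
    exact ih _ _ (max_le ha (hf x List.mem_cons_self)) (fun y hy => hf y (List.mem_cons_of_mem x hy))

theorem pv_le_fm_init {α : Type} (l : List α) (f : α → Int) :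
    ∀ a : Int, a ≤ l.foldl (fun acc x => max acc (f x)) a := by
  induction l with
  | nil => intro a; exact le_rfl
  | cons x l ih => intro a; exact le_trans (le_max_left _ _) (ih _)

theorem pv_le_fm_mem {α : Type} (l : List α) (f : α → Int) (x : α) :
    ∀ a : Int, x ∈ l → f x ≤ l.foldl (fun acc y => max acc (f y)) a := by
  induction l with
  | nil => intro a h; cases h
  | cons z l ih =>
    intro a h
    rcases List.mem_cons.1 h with h | h
    · subst h; exact le_trans (le_max_right _ _) (pv_le_fm_init l f _)
    · exact ih _ h

theorem pv_fm_mono {α : Type} (l : List α) (f g : α → Int) :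
    ∀ a b : Int, a ≤ b → (∀ x ∈ l, f x ≤ g x) →
      l.foldl (fun acc x => max acc (f x)) a ≤ l.foldl (fun acc x => max acc (g x)) b := by
  induction l with
  | nil => intro a b hab _; exact hab
  | cons x l ih =>
    intro a b hab h
    exact ih _ _ (max_le_max hab (h x List.mem_cons_self)) (fun y hy => h y (List.mem_cons_of_mem x hy))

-- greedy counters are nonnegative
theorem pv_gc_nonneg (k x y : Int) (l : List Int) : 0 ≤ pvGc k x y l := by
  rw [pvGc]
  have : ∀ (l : List Int) (c : Int), 0 ≤ c →
      0 ≤ l.foldl (fun c num => if PySem.Int.mod num k = (if c % 2 = 0 then x else y) then c + 1 else c) c := by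
    intro l
    induction l with
    | nil => intro c hc; exact hc
    | cons n l ih =>
      intro c hc
      refine ih _ ?_
      dsimp only
      split_ifs <;> omega
  exact this l 0 le_rfl

theorem pv_gc_snoc (k x y : Int) (l : List Int) (num : Int) :
    pvGc k x y (l ++ [num])
      = (if PySem.Int.mod num k = (if pvGc k x y l % 2 = 0 then x else y) then pvGc k x y l + 1 else pvGc k x y l) := by
  rw [pvGc, List.foldl_append, List.foldl_cons, List.foldl_nil]; rfl

-- pvPt basics
theorem pv_pt_range (k t r : Int) (hk : 0 < k) : 0 ≤ pvPt k t r ∧ pvPt k t r < k :=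
  ⟨PySem.Int.mod_nonneg _ hk, PySem.Int.mod_lt _ hk⟩

theorem pv_pt_invol (k t r : Int) (hk : 0 < k) (h0 : 0 ≤ r) (hr : r < k) :
    pvPt k t (pvPt k t r) = r := by
  rw [pvPt, pvPt, PySem.Int.mod_eq_emod_of_pos hk, PySem.Int.mod_eq_emod_of_pos hk,
    Int.sub_emod t ((t - r) % k) k, Int.emod_emod_of_dvd _ dvd_rfl, ← Int.sub_emod,
    sub_sub_cancel, Int.emod_eq_of_lt h0 hr]

theorem pv_pt_pair (k x y : Int) (hk : 0 < k) (hy0 : 0 ≤ y) (hyk : y < k) :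
    pvPt k (PySem.Int.mod (x + y) k) x = y := by
  rw [pvPt, PySem.Int.mod_eq_emod_of_pos hk, PySem.Int.mod_eq_emod_of_pos hk,
    Int.sub_emod ((x + y) % k) x k, Int.emod_emod_of_dvd _ dvd_rfl, ← Int.sub_emod,
    add_sub_cancel_left, Int.emod_eq_of_lt hy0 hyk]

theorem pv_cell_nonneg (k t : Int) (l : List Int) (r : Int) : 0 ≤ pvCell k t l r := by
  have h := pv_gc_nonneg k r (pvPt k t r) l
  refine le_trans ?_ (le_max_left _ _)
  rw [pvOdd0]; split_ifs <;> omega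

theorem pv_odd_even_max (n : Int) (_hn : 0 ≤ n) : max (pvOdd0 n) (pvEven0 n) = n := by
  rw [pvOdd0, pvEven0]; split_ifs <;> omega

theorem pv_odd_le (n : Int) (_hn : 0 ≤ n) : pvOdd0 n ≤ n := by
  rw [pvOdd0]; split_ifs <;> omega

theorem pv_even_le (n : Int) (_hn : 0 ≤ n) : pvEven0 n ≤ n := by
  rw [pvEven0]; split_ifs <;> omega

-- the central invariant: the per-target model is described by the greedy counters
theorem pv_inv (k t : Int) (hk : 0 < k) (l : List Int) :
    (∀ r : Int, 0 ≤ r → r < k → (pvM k t l).1 r = pvCell k t l r) ∧ (pvM k t l).2 = pvCellMax k t l := by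
  induction l using List.reverseRecOn with
  | nil =>
    constructor
    · intro r _ _
      simp [pvM, pvCell, pvGc, pvOdd0, pvEven0]
    · rw [pvCellMax]
      have h1 : (0 : Int) ≤ (PySem.List.pyRange 0 k 1).foldl (fun a r => max a (pvCell k t [] r)) 0 :=
        pv_le_fm_init _ _ 0
      have h2 : (PySem.List.pyRange 0 k 1).foldl (fun a r => max a (pvCell k t [] r)) 0 ≤ 0 := by
        apply pv_fm_le _ _ _ _ le_rfl
        intro r _
        simp [pvCell, pvGc, pvOdd0, pvEven0]
      have h3 : (pvM k t []).2 = 0 := rfl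
      rw [h3]
      omega
  | append_singleton l num ih =>
    obtain ⟨ih1, ih2⟩ := ih
    have hr0 : 0 ≤ PySem.Int.mod num k := PySem.Int.mod_nonneg _ hk
    have hrk : PySem.Int.mod num k < k := PySem.Int.mod_lt _ hk
    set r0 := PySem.Int.mod num k with hr0def
    set p0 := pvPt k t r0 with hp0def
    have hp0' : p0 = PySem.Int.mod (t - r0) k := hp0def
    obtain ⟨hp00, hp0k⟩ := pv_pt_range k t r0 hk
    rw [← hp0def] at hp00 hp0k
    have hinvol : pvPt k t p0 = r0 := pv_pt_invol k t r0 hk hr0 hrk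
    have hMsnoc : pvM k t (l ++ [num]) = pvMStep k t (pvM k t l) num := by
      rw [pvM, List.foldl_append, List.foldl_cons, List.foldl_nil]; rfl
    -- the new value written into cell r0
    have hv : (pvMStep k t (pvM k t l) num).1 r0 = (pvM k t l).1 p0 + 1 := by
      simp [pvMStep, ← hr0def, ← hp0']
    -- cells other than r0 are untouched by the model step
    have hother : ∀ r : Int, r ≠ r0 → (pvMStep k t (pvM k t l) num).1 r = (pvM k t l).1 r := by
      intro r hr
      simp [pvMStep, ← hr0def, hr]
    -- greedy counters for pairs not containing r0 are unchanged
    have hGother : ∀ x y : Int, x ≠ r0 → y ≠ r0 → pvGc k x y (l ++ [num]) = pvGc k x y l := by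
      intro x y hx hy
      rw [pv_gc_snoc, if_neg]
      intro h
      rw [← hr0def] at h
      split_ifs at h
      · exact hx h.symm
      · exact hy h.symm
    -- cell values after the step, for every residue in range
    have hcell : ∀ r : Int, 0 ≤ r → r < k → pvCell k t (l ++ [num]) r
        = if r = r0 then pvCell k t l p0 + 1 else pvCell k t l r := by
      intro r hr0' hrk'
      by_cases hrr : r = r0
      · subst hrr
        rw [if_pos rfl]
        by_cases hpr : p0 = r0
        · -- self-partner: the greedy counter always expects r0 and increments here
          rw [hpr, pvCell, pvCell, ← hp0def, hpr, pv_gc_snoc]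
          have hg := pv_gc_nonneg k r0 r0 l
          simp only [pvOdd0, pvEven0]
          split_ifs <;> omega
        · rw [pvCell, pvCell, ← hp0def, hinvol, pv_gc_snoc, pv_gc_snoc]
          have ha0 := pv_gc_nonneg k r0 p0 l
          have hb0 := pv_gc_nonneg k p0 r0 l
          simp only [pvOdd0, pvEven0]
          split_ifs <;> omega
      · rw [if_neg hrr, pvCell, pvCell]
        by_cases hrp : r = p0
        · -- partner cell of r0: the counters may step but the cell value is unchanged
          subst hrp
          rw [hinvol, pv_gc_snoc, pv_gc_snoc]
          have ha0 := pv_gc_nonneg k p0 r0 l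
          have hb0 := pv_gc_nonneg k r0 p0 l
          have hpr : p0 ≠ r0 := hrr
          simp only [pvOdd0, pvEven0]
          split_ifs <;> omega
        · -- a pair that does not contain r0 at all: counters unchanged
          have hptr : pvPt k t r ≠ r0 := by
            intro h
            apply hrp
            have h2 := congrArg (pvPt k t) h
            rw [pv_pt_invol k t r hk hr0' hrk'] at h2
            exact h2.trans hp0def.symm
          rw [hGother r (pvPt k t r) hrr hptr, hGother (pvPt k t r) r hptr hrr]
    -- cells only grow
    have hmono : ∀ r : Int, 0 ≤ r → r < k → pvCell k t l r ≤ pvCell k t (l ++ [num]) r := by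
      intro r h1 h2
      rw [hcell r h1 h2]
      by_cases hrr : r = r0
      · subst hrr
        rw [if_pos rfl, pvCell, pvCell, ← hp0def, hinvol]
        have ha0 := pv_gc_nonneg k r0 p0 l
        have hb0 := pv_gc_nonneg k p0 r0 l
        simp only [pvOdd0, pvEven0]
        split_ifs <;> omega
      · rw [if_neg hrr]
    constructor
    · intro r h1 h2
      rw [hMsnoc, hcell r h1 h2]
      by_cases hrr : r = r0
      · subst hrr
        rw [if_pos rfl, hv, ih1 p0 hp00 hp0k]
      · rw [if_neg hrr, hother r hrr, ih1 r h1 h2]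
    · rw [hMsnoc]
      have hstep2 : (pvMStep k t (pvM k t l) num).2 = max (pvM k t l).2 ((pvM k t l).1 p0 + 1) := by
        simp [pvMStep, ← hr0def, ← hp0']
      rw [hstep2, ih2, ih1 p0 hp00 hp0k]
      have hvcell : pvCell k t l p0 + 1 = pvCell k t (l ++ [num]) r0 := by
        rw [hcell r0 hr0 hrk, if_pos rfl]
      rw [hvcell]
      -- max(cellMax l, cell l' r0) = cellMax l'
      apply le_antisymm
      · apply max_le
        · exact pv_fm_mono _ _ _ 0 0 le_rfl (fun r hr => by
            rw [PySem.List.mem_pyRange_one] at hr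
            exact hmono r hr.1 hr.2)
        · exact pv_le_fm_mem _ _ r0 0 (by rw [PySem.List.mem_pyRange_one]; exact ⟨hr0, hrk⟩)
      · apply pv_fm_le
        · exact le_trans (by have := pv_cell_nonneg k t (l ++ [num]) r0; omega) (le_max_right _ _)
        · intro r hr
          rw [PySem.List.mem_pyRange_one] at hr
          rw [hcell r hr.1 hr.2]
          by_cases hrr : r = r0
          · subst hrr
            rw [if_pos rfl, hvcell]
            exact le_max_right _ _
          · rw [if_neg hrr]
            exact le_trans (pv_le_fm_mem _ _ r 0 (by rw [PySem.List.mem_pyRange_one]; exact hr)) (le_max_left _ _)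

def pvMx (nums : List Int) (k x : Int) : Int :=
  (PySem.List.pyRange 0 k 1).foldl (fun a y => max a (pvGc k x y nums)) 0

-- ===== B side: two-pointer greedy merge = greedy counters =====

theorem pv_altc_drop_nil (a b : List Int) (cur : Int)
    (h : a.dropWhile (fun p => decide (p ≤ cur)) = []) : pvAltc a b cur = 0 := by
  rw [pvAltc]
  split
  · rfl
  · simp_all

theorem pv_altc_drop_cons (a b : List Int) (cur p : Int) (t : List Int)
    (h : a.dropWhile (fun p => decide (p ≤ cur)) = p :: t) : pvAltc a b cur = 1 + pvAltc b t p := by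
  rw [pvAltc]
  split
  · simp_all
  · rename_i p' t' h'
    rw [h] at h'
    cases h'
    rfl

-- residue-level greedy of the pattern w, w', w, w', …
def pvGr : Int → Int → List Int → Int
  | _, _, [] => 0
  | w, w', r :: t => if r = w then 1 + pvGr w' w t else pvGr w w' t

def pvRs (nums : List Int) (k : Int) : List Int := nums.map (fun n => PySem.Int.mod n k)

def pvPl (nums : List Int) (k : Int) : List (Int × Int) :=
  (PySem.List.enumerate nums).map (fun p => (PySem.Int.mod p.2 k, p.1))

def pvPosOf (pl : List (Int × Int)) (w : Int) : List Int :=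
  (pl.filter (fun q => q.1 == w)).map (fun q => q.2)

theorem pv_posOf_cons (q : Int × Int) (T : List (Int × Int)) (w : Int) :
    pvPosOf (q :: T) w = if q.1 = w then q.2 :: pvPosOf T w else pvPosOf T w := by
  rw [pvPosOf, List.filter_cons]
  by_cases h : q.1 = w
  · rw [if_pos (by simp [h]), if_pos h, List.map_cons]
    rfl
  · rw [if_neg (by simp [h]), if_neg h]
    rfl

-- the parity-state fold pvGc is the swap-recursion greedy pvGr on the residue list
theorem pv_gc_aux (k x y : Int) : ∀ (l : List Int) (c : Int), 0 ≤ c →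
    l.foldl (fun c num => if PySem.Int.mod num k = (if c % 2 = 0 then x else y) then c + 1 else c) c
      = c + (if c % 2 = 0 then pvGr x y (l.map (fun n => PySem.Int.mod n k))
             else pvGr y x (l.map (fun n => PySem.Int.mod n k))) := by
  intro l
  induction l with
  | nil =>
    intro c hc
    simp only [List.foldl_nil, List.map_nil, pvGr]
    split_ifs <;> omega
  | cons n l ih =>
    intro c hc
    rw [List.foldl_cons, List.map_cons]
    by_cases hpar : c % 2 = 0
    · by_cases hm : PySem.Int.mod n k = x
      · have hp1 : ¬((c + 1) % 2 = 0) := by omega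
        rw [show (if PySem.Int.mod n k = if c % 2 = 0 then x else y then c + 1 else c) = c + 1 by
          rw [if_pos hpar, if_pos hm]]
        rw [ih (c + 1) (by omega)]
        simp only [pvGr]
        rw [if_neg hp1, if_pos hpar, if_pos hm]
        omega
      · rw [show (if PySem.Int.mod n k = if c % 2 = 0 then x else y then c + 1 else c) = c by
          rw [if_pos hpar, if_neg hm]]
        rw [ih c hc]
        simp only [pvGr]
        rw [if_pos hpar, if_pos hpar, if_neg hm]
    · by_cases hm : PySem.Int.mod n k = y
      · have hp1 : (c + 1) % 2 = 0 := by omega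
        rw [show (if PySem.Int.mod n k = if c % 2 = 0 then x else y then c + 1 else c) = c + 1 by
          rw [if_neg hpar, if_pos hm]]
        rw [ih (c + 1) (by omega)]
        simp only [pvGr]
        rw [if_pos hp1, if_neg hpar, if_pos hm]
        omega
      · rw [show (if PySem.Int.mod n k = if c % 2 = 0 then x else y then c + 1 else c) = c by
          rw [if_neg hpar, if_neg hm]]
        rw [ih c hc]
        simp only [pvGr]
        rw [if_neg hpar, if_neg hpar, if_neg hm]

theorem pv_gc_eq_gr (k x y : Int) (l : List Int) :
    pvGc k x y l = pvGr x y (l.map (fun n => PySem.Int.mod n k)) := by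
  have h := pv_gc_aux k x y l 0 le_rfl
  rw [if_pos (by norm_num)] at h
  rw [pvGc, h]
  omega

theorem pv_gr_absent (w w' : Int) : ∀ rs : List Int, w ∉ rs → pvGr w w' rs = 0 := by
  intro rs
  induction rs with
  | nil => intro _; rfl
  | cons r t ih =>
    intro h
    rw [pvGr, if_neg (by intro hh; exact h (hh ▸ List.mem_cons_self))]
    exact ih (fun hh => h (List.mem_cons_of_mem r hh))

theorem pv_gr_partner_absent (w w' : Int) : ∀ rs : List Int, w' ∉ rs → pvGr w w' rs ≤ 1 := by
  intro rs
  induction rs with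
  | nil => intro _; norm_num [pvGr]
  | cons r t ih =>
    intro h
    rw [pvGr]
    split_ifs with hr
    · rw [pv_gr_absent w' w t (fun hh => h (List.mem_cons_of_mem r hh))]
      omega
    · exact ih (fun hh => h (List.mem_cons_of_mem r hh))

theorem pv_gr_diag (w : Int) : ∀ rs : List Int, pvGr w w rs = (rs.count w : Int) := by
  intro rs
  induction rs with
  | nil => rfl
  | cons r t ih =>
    rw [pvGr, List.count_cons]
    by_cases hr : r = w
    · rw [if_pos hr, ih, show (r == w) = true by simp [hr]]
      simp
      omega
    · rw [if_neg hr, ih, show (r == w) = false by simp [hr]]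
      simp

-- stale prefix of values ≤ cur is skipped by the dropWhile
theorem pv_drop_stale (s l : List Int) (cur : Int) (hs : ∀ a ∈ s, a ≤ cur) :
    (s ++ l).dropWhile (fun p => decide (p ≤ cur)) = l.dropWhile (fun p => decide (p ≤ cur)) := by
  induction s with
  | nil => rfl
  | cons a s ih =>
    rw [List.cons_append, List.dropWhile_cons, if_pos (by simp [hs a List.mem_cons_self])]
    exact ih (fun b hb => hs b (List.mem_cons_of_mem a hb))

-- the two-pointer merge computes the greedy pattern count (distinct pattern residues)
theorem pv_altc_merge : ∀ (F : List (Int × Int)) (w w' : Int), w ≠ w' →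
    ∀ (s₁ s₂ : List Int) (cur : Int),
    F.Pairwise (fun q q' => q.2 < q'.2) →
    (∀ q ∈ F, cur < q.2) →
    (∀ a ∈ s₁, a ≤ cur) →
    (∀ a ∈ s₂, ∀ q ∈ F, a < q.2) →
    pvAltc (s₁ ++ pvPosOf F w) (s₂ ++ pvPosOf F w') cur = pvGr w w' (F.map (fun q => q.1)) := by
  intro F
  induction F with
  | nil =>
    intro w w' _ s₁ s₂ cur _ _ hs₁ _
    rw [pvPosOf, pvPosOf]
    simp only [List.filter_nil, List.map_nil, List.append_nil]
    rw [pv_altc_drop_nil _ _ _ (by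
      rw [show (s₁ : List Int) = s₁ ++ [] by simp, pv_drop_stale s₁ [] cur hs₁]
      rfl)]
    rfl
  | cons q T ih =>
    intro w w' hww s₁ s₂ cur hinc hcur hs₁ hs₂
    obtain ⟨hqT, hincT⟩ := List.pairwise_cons.mp hinc
    rw [List.map_cons, pvGr]
    by_cases hqw : q.1 = w
    · rw [if_pos hqw, pv_posOf_cons, if_pos hqw, pv_posOf_cons, if_neg (by rw [hqw]; exact hww)]
      have hdrop : (s₁ ++ q.2 :: pvPosOf T w).dropWhile (fun p => decide (p ≤ cur))
          = q.2 :: pvPosOf T w := by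
        rw [pv_drop_stale s₁ _ cur hs₁, List.dropWhile_cons,
          if_neg (by simp; exact hcur q List.mem_cons_self)]
      rw [pv_altc_drop_cons _ _ _ _ _ hdrop]
      have := ih w' w (Ne.symm hww) s₂ [] q.2 hincT
        (fun q' hq' => hqT q' hq')
        (fun a ha => le_of_lt (hs₂ a ha q List.mem_cons_self))
        (by intro a ha; cases ha)
      rw [List.nil_append] at this
      rw [this]
    · rw [if_neg hqw, pv_posOf_cons, if_neg hqw, pv_posOf_cons]
      by_cases hqw' : q.1 = w'
      · rw [if_pos hqw']
        have hassoc : s₂ ++ q.2 :: pvPosOf T w' = (s₂ ++ [q.2]) ++ pvPosOf T w' := by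
          simp
        rw [hassoc]
        exact ih w w' hww s₁ (s₂ ++ [q.2]) cur hincT
          (fun q' hq' => hcur q' (List.mem_cons_of_mem q hq'))
          hs₁
          (by
            intro a ha q' hq'
            rcases List.mem_append.mp ha with h | h
            · exact hs₂ a h q' (List.mem_cons_of_mem q hq')
            · rw [List.mem_singleton.mp h]
              exact hqT q' hq')
      · rw [if_neg hqw']
        exact ih w w' hww s₁ s₂ cur hincT
          (fun q' hq' => hcur q' (List.mem_cons_of_mem q hq'))
          hs₁
          (fun a ha q' hq' => hs₂ a ha q' (List.mem_cons_of_mem q hq'))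

-- the diagonal pair: both pointers walk the same increasing list, every element is taken
theorem pv_altc_diag : ∀ (P s₁ s₂ : List Int) (cur : Int),
    P.Pairwise (· < ·) →
    (∀ p ∈ P, cur < p) →
    (∀ a ∈ s₁, a ≤ cur) →
    (∀ a ∈ s₂, ∀ p ∈ P, a < p) →
    pvAltc (s₁ ++ P) (s₂ ++ P) cur = (P.length : Int) := by
  intro P
  induction P with
  | nil =>
    intro s₁ s₂ cur _ _ hs₁ _
    rw [pv_altc_drop_nil _ _ _ (by
      rw [show s₁ ++ ([] : List Int) = s₁ ++ [] by rfl, pv_drop_stale s₁ [] cur hs₁]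
      rfl)]
    rfl
  | cons p T ih =>
    intro s₁ s₂ cur hinc hcur hs₁ hs₂
    obtain ⟨hpT, hincT⟩ := List.pairwise_cons.mp hinc
    have hdrop : (s₁ ++ p :: T).dropWhile (fun q => decide (q ≤ cur)) = p :: T := by
      rw [pv_drop_stale s₁ _ cur hs₁, List.dropWhile_cons,
        if_neg (by simp; exact hcur p List.mem_cons_self)]
    rw [pv_altc_drop_cons _ _ _ _ _ hdrop]
    have hI := ih (s₂ ++ [p]) [] p hincT hpT
      (by
        intro a ha
        rcases List.mem_append.mp ha with h | h
        · exact le_of_lt (hs₂ a h p List.mem_cons_self)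
        · exact le_of_eq (List.mem_singleton.mp h))
      (by intro a ha; cases ha)
    rw [List.nil_append] at hI
    rw [show s₂ ++ p :: T = (s₂ ++ [p]) ++ T by simp, hI]
    simp
    omega

-- facts about the position list pvPl
theorem pv_pl_pairwise (nums : List Int) (k : Int) :
    (pvPl nums k).Pairwise (fun q q' => q.2 < q'.2) := by
  rw [pvPl]
  exact (List.pairwise_map).mpr (PySem.List.pairwise_lt_enumerate nums 0)

theorem pv_pl_pos (nums : List Int) (k : Int) : ∀ q ∈ pvPl nums k, (-1 : Int) < q.2 := by
  intro q hq
  rw [pvPl, List.mem_map] at hq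
  obtain ⟨p, hp, rfl⟩ := hq
  rw [PySem.List.mem_enumerate_iff] at hp
  obtain ⟨j, hj, rfl⟩ := hp
  simp
  omega

theorem pv_pl_fst (nums : List Int) (k : Int) : (pvPl nums k).map (fun q => q.1) = pvRs nums k := by
  rw [pvPl, pvRs, List.map_map]
  have h : (PySem.List.enumerate nums 0).map (fun p => PySem.Int.mod p.2 k)
      = ((PySem.List.enumerate nums 0).map (fun p => p.2)).map (fun n => PySem.Int.mod n k) := by
    rw [List.map_map]
    rfl
  rw [show ((fun q : Int × Int => q.1) ∘ fun p : Int × Int => (PySem.Int.mod p.2 k, p.1))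
      = fun p : Int × Int => PySem.Int.mod p.2 k from rfl, h, PySem.List.map_snd_enumerate]

theorem pv_len_filter_count : ∀ (pl : List (Int × Int)) (x : Int),
    ((pl.filter (fun q => q.1 == x)).map (fun q => q.2)).length = List.count x (pl.map (fun q => q.1)) := by
  intro pl x
  induction pl with
  | nil => rfl
  | cons q T ih =>
    rw [List.map_cons, List.count_cons, List.filter_cons]
    by_cases h : q.1 = x
    · rw [if_pos (by simp [h]), List.map_cons, List.length_cons, ih, show (q.1 == x) = true by simp [h]]
      simp
    · rw [if_neg (by simp [h]), ih, show (q.1 == x) = false by simp [h]]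
      simp

-- per ordered pair: the two-pointer merge over the position lists equals the greedy counter
theorem pv_pair_altc (nums : List Int) (k x y : Int) :
    pvAltc (pvPosOf (pvPl nums k) x) (pvPosOf (pvPl nums k) y) (-1) = pvGc k x y nums := by
  rw [pv_gc_eq_gr, show nums.map (fun n => PySem.Int.mod n k) = pvRs nums k from rfl, ← pv_pl_fst nums k]
  by_cases hxy : x = y
  · subst hxy
    have hP : (pvPosOf (pvPl nums k) x).Pairwise (· < ·) := by
      rw [pvPosOf]
      exact (List.pairwise_map).mpr ((pv_pl_pairwise nums k).sublist List.filter_sublist)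
    have hP2 : ∀ p ∈ pvPosOf (pvPl nums k) x, (-1 : Int) < p := by
      intro p hp
      rw [pvPosOf, List.mem_map] at hp
      obtain ⟨q, hq, rfl⟩ := hp
      exact pv_pl_pos nums k q (List.mem_of_mem_filter hq)
    have h := pv_altc_diag (pvPosOf (pvPl nums k) x) [] [] (-1) hP hP2
      (by intro a ha; cases ha) (by intro a ha; cases ha)
    rw [List.nil_append] at h
    rw [h, pv_gr_diag]
    norm_cast
    rw [pvPosOf]
    exact pv_len_filter_count _ _
  · have h := pv_altc_merge (pvPl nums k) x y hxy [] [] (-1)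
      (pv_pl_pairwise nums k) (pv_pl_pos nums k)
      (by intro a ha; cases ha) (by intro a ha; cases ha)
    rw [List.nil_append, List.nil_append] at h
    exact h

-- ===== the position dictionary =====

def pvPos (nums : List Int) (k : Int) : PySem.Dict Int (List Int) :=
  (PySem.List.enumerate nums).foldl
    (fun d p => d.modify (PySem.Int.mod p.2 k) ([] : List Int) (fun l => l ++ [p.1]))
    PySem.Dict.empty

theorem pv_pos_eq_pl (nums : List Int) (k : Int) :
    pvPos nums k = (pvPl nums k).foldl
      (fun d q => d.modify q.1 ([] : List Int) (fun l => l ++ [q.2])) PySem.Dict.empty := by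
  rw [pvPos, pvPl, List.foldl_map]

theorem pv_pos_getD (nums : List Int) (k c : Int) :
    (pvPos nums k).getD c [] = pvPosOf (pvPl nums k) c := by
  rw [pv_pos_eq_pl, PySem.Dict.getD_foldl_modify_append, PySem.Dict.getD_empty, List.nil_append]
  rfl

theorem pv_pos_keys (nums : List Int) (k : Int) :
    (pvPos nums k).keys = PySem.Set.ofList (pvRs nums k) := by
  rw [pv_pos_eq_pl, PySem.Dict.keys_foldl_modify_key, PySem.Dict.keys_empty,
    PySem.Set.update_nil_left, pv_pl_fst]

theorem pv_pos_keys_nodup (nums : List Int) (k : Int) : (pvPos nums k).keys.Nodup := by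
  rw [pv_pos_keys]
  exact PySem.Set.nodup_ofList _

theorem pv_pos_mem_keys (nums : List Int) (k c : Int) :
    c ∈ (pvPos nums k).keys ↔ c ∈ pvRs nums k := by
  rw [pv_pos_keys]
  simp [PySem.Set.mem_ofList]

theorem pv_pos_items (nums : List Int) (k : Int) :
    (pvPos nums k).items = (pvPos nums k).keys.map (fun c => (c, (pvPos nums k).getD c [])) :=
  PySem.Dict.items_eq_map_keys _ (pv_pos_keys_nodup nums k) []

-- the per-x inner loop value and its guarded version
def pvMn (nums : List Int) (k x : Int) : Int :=
  (pvPos nums k).items.foldl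
    (fun a yp => max a (pvAltc ((pvPos nums k).getD x []) yp.2 (-1))) 0

def pvMn' (nums : List Int) (k x : Int) : Int :=
  if (pvPos nums k).contains x then pvMn nums k x else 0

theorem pv_bnew (nums : List Int) (k : Int) :
    maximumLength2_alt nums k
      = (PySem.List.pyRange 0 k 1).foldl (fun a x => max a (pvMn' nums k x)) 0 := by
  show (PySem.List.pyRange 0 k 1).foldl (fun res x =>
      if (pvPos nums k).contains x then
        (pvPos nums k).items.foldl
          (fun res yp => max res (pvAltc ((pvPos nums k).getD x []) yp.2 (-1))) res
      else res) 0 = _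
  have main : ∀ (xs : List Int) (a : Int), 0 ≤ a →
      xs.foldl (fun res x =>
        if (pvPos nums k).contains x then
          (pvPos nums k).items.foldl
            (fun res yp => max res (pvAltc ((pvPos nums k).getD x []) yp.2 (-1))) res
        else res) a
      = xs.foldl (fun a x => max a (pvMn' nums k x)) a := by
    intro xs
    induction xs with
    | nil => intro a _; rfl
    | cons x xs ih =>
      intro a ha
      rw [List.foldl_cons, List.foldl_cons]
      have hstep : (if (pvPos nums k).contains x then
          (pvPos nums k).items.foldl
            (fun res yp => max res (pvAltc ((pvPos nums k).getD x []) yp.2 (-1))) a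
        else a) = max a (pvMn' nums k x) := by
        rw [pvMn']
        split_ifs with hc
        · have h := pv_foldl_max_start (fun yp : Int × List Int => pvAltc ((pvPos nums k).getD x []) yp.2 (-1))
            (pvPos nums k).items a 0
          rw [max_eq_left ha] at h
          exact h
        · omega
      rw [hstep]
      exact ih _ (le_trans ha (le_max_left _ _))
  exact main _ 0 le_rfl

-- bridging: max over all pairs of greedy counters = max over present pairs of merge values
theorem pv_bridge (nums : List Int) (k : Int) (hk : 0 < k) :
    (PySem.List.pyRange 0 k 1).foldl (fun a x => max a (pvMn' nums k x)) 0
      = (PySem.List.pyRange 0 k 1).foldl (fun a x => max a (pvMx nums k x)) 0 := by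
  set BN := (PySem.List.pyRange 0 k 1).foldl (fun a x => max a (pvMn' nums k x)) 0 with hBN
  set AM := (PySem.List.pyRange 0 k 1).foldl (fun a x => max a (pvMx nums k x)) 0 with hAM
  have hBN0 : (0 : Int) ≤ BN := pv_le_fm_init _ _ 0
  have hAM0 : (0 : Int) ≤ AM := pv_le_fm_init _ _ 0
  have hres_range : ∀ c ∈ pvRs nums k, 0 ≤ c ∧ c < k := by
    intro c hc
    rw [pvRs, List.mem_map] at hc
    obtain ⟨n, _, rfl⟩ := hc
    exact ⟨PySem.Int.mod_nonneg _ hk, PySem.Int.mod_lt _ hk⟩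
  -- the merge value at a present pair is ≤ BN
  have hterm_le : ∀ x y : Int, x ∈ pvRs nums k → y ∈ pvRs nums k → 0 ≤ x → x < k →
      pvGc k x y nums ≤ BN := by
    intro x y hx hy hx0 hxk
    have hyitem : (y, (pvPos nums k).getD y []) ∈ (pvPos nums k).items := by
      rw [pv_pos_items]
      exact List.mem_map.mpr ⟨y, (pv_pos_mem_keys nums k y).mpr hy, rfl⟩
    have h1 : pvGc k x y nums ≤ pvMn nums k x := by
      have h' : pvAltc ((pvPos nums k).getD x []) ((pvPos nums k).getD y []) (-1) ≤ pvMn nums k x :=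
        pv_le_fm_mem (pvPos nums k).items _ _ 0 hyitem
      rw [pv_pos_getD, pv_pos_getD, pv_pair_altc] at h'
      exact h'
    have h2 : pvMn' nums k x = pvMn nums k x := by
      rw [pvMn', if_pos ((PySem.Dict.contains_iff_mem_keys (pvPos nums k) x).mpr ((pv_pos_mem_keys nums k x).mpr hx))]
    calc pvGc k x y nums ≤ pvMn nums k x := h1
      _ = pvMn' nums k x := h2.symm
      _ ≤ BN := pv_le_fm_mem _ _ x 0 (by rw [PySem.List.mem_pyRange_one]; exact ⟨hx0, hxk⟩)
  apply le_antisymm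
  · -- BN ≤ AM: every merge value is a greedy counter of an in-range pair
    apply pv_fm_le _ _ _ _ hAM0
    intro x hx
    rw [PySem.List.mem_pyRange_one] at hx
    rw [pvMn']
    split_ifs with hc
    · apply pv_fm_le _ _ _ _ hAM0
      intro yp hyp
      rw [pv_pos_items, List.mem_map] at hyp
      obtain ⟨y, hy, rfl⟩ := hyp
      rw [pv_pos_mem_keys] at hy
      obtain ⟨hy0, hyk⟩ := hres_range y hy
      show pvAltc ((pvPos nums k).getD x []) ((pvPos nums k).getD y []) (-1) ≤ AM
      rw [pv_pos_getD, pv_pos_getD, pv_pair_altc]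
      calc pvGc k x y nums
          ≤ pvMx nums k x := pv_le_fm_mem _ _ y 0 (by rw [PySem.List.mem_pyRange_one]; exact ⟨hy0, hyk⟩)
        _ ≤ AM := pv_le_fm_mem _ _ x 0 (by rw [PySem.List.mem_pyRange_one]; exact hx)
    · exact hAM0
  · -- AM ≤ BN: every greedy counter is bounded through the present pairs
    apply pv_fm_le _ _ _ _ hBN0
    intro x hx
    rw [PySem.List.mem_pyRange_one] at hx
    apply pv_fm_le _ _ _ _ hBN0
    intro y hy
    rw [PySem.List.mem_pyRange_one] at hy
    by_cases hxm : x ∈ pvRs nums k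
    · by_cases hym : y ∈ pvRs nums k
      · exact hterm_le x y hxm hym hx.1 hx.2
      · have h1 : pvGc k x y nums ≤ 1 := by
          rw [pv_gc_eq_gr]
          exact pv_gr_partner_absent x y _ hym
        have h2 : (1 : Int) ≤ pvGc k x x nums := by
          rw [pv_gc_eq_gr, pv_gr_diag]
          have h3 : 0 < List.count x (nums.map (fun n => PySem.Int.mod n k)) :=
            List.count_pos_iff.mpr hxm
          omega
        exact le_trans h1 (le_trans h2 (hterm_le x x hxm hxm hx.1 hx.2))
    · have h1 : pvGc k x y nums = 0 := by
        rw [pv_gc_eq_gr]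
        exact pv_gr_absent x y _ hxm
      rw [h1]
      exact hBN0

-- ===== final assembly =====

-- A's result is the max over all ordered residue pairs of the greedy counters
theorem pv_a_flat (nums : List Int) (k : Int) (hk : 0 < k) :
    maximumLength2 nums k = (PySem.List.pyRange 0 k 1).foldl (fun a x => max a (pvMx nums k x)) 0 := by
  have hA : maximumLength2 nums k = pvR k (fun t => pvM k t nums) :=
    (pv_aloop k hk nums _ _ (pv_rel_init k)).2.2.2
  rw [hA, pvR]
  have hAcm : (PySem.List.pyRange 0 k 1).foldl (fun a t => max a ((pvM k t nums).2)) 0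
      = (PySem.List.pyRange 0 k 1).foldl (fun a t => max a (pvCellMax k t nums)) 0 := by
    apply PySem.List.foldl_congr_mem
    intro a t _
    rw [(pv_inv k t hk nums).2]
  rw [hAcm]
  set B := (PySem.List.pyRange 0 k 1).foldl (fun a x => max a (pvMx nums k x)) 0 with hB
  set A := (PySem.List.pyRange 0 k 1).foldl (fun a t => max a (pvCellMax k t nums)) 0 with hA2
  have hB0 : (0 : Int) ≤ B := pv_le_fm_init _ _ 0
  have hA0 : (0 : Int) ≤ A := pv_le_fm_init _ _ 0
  apply le_antisymm
  · -- every cell value is bounded by some greedy counter, hence by B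
    apply pv_fm_le _ _ _ _ hB0
    intro t ht
    rw [PySem.List.mem_pyRange_one] at ht
    apply pv_fm_le _ _ _ _ hB0
    intro r hr
    rw [PySem.List.mem_pyRange_one] at hr
    obtain ⟨hp0, hpk⟩ := pv_pt_range k t r hk
    have h1 : pvGc k r (pvPt k t r) nums ≤ B :=
      le_trans (pv_le_fm_mem _ _ (pvPt k t r) 0 (by rw [PySem.List.mem_pyRange_one]; exact ⟨hp0, hpk⟩))
        (pv_le_fm_mem _ _ r 0 (by rw [PySem.List.mem_pyRange_one]; exact hr))
    have h2 : pvGc k (pvPt k t r) r nums ≤ B :=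
      le_trans (pv_le_fm_mem _ _ r 0 (by rw [PySem.List.mem_pyRange_one]; exact hr))
        (pv_le_fm_mem _ _ (pvPt k t r) 0 (by rw [PySem.List.mem_pyRange_one]; exact ⟨hp0, hpk⟩))
    rw [pvCell]
    apply max_le
    · exact le_trans (pv_odd_le _ (pv_gc_nonneg k r (pvPt k t r) nums)) h1
    · exact le_trans (pv_even_le _ (pv_gc_nonneg k (pvPt k t r) r nums)) h2
  · -- every greedy counter is bounded by some cell of its pair's target, hence by A
    apply pv_fm_le _ _ _ _ hA0
    intro x hx
    rw [PySem.List.mem_pyRange_one] at hx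
    apply pv_fm_le _ _ _ _ hA0
    intro y hy
    rw [PySem.List.mem_pyRange_one] at hy
    set t := PySem.Int.mod (x + y) k with htdef
    have ht0 : 0 ≤ t := PySem.Int.mod_nonneg _ hk
    have htk : t < k := PySem.Int.mod_lt _ hk
    have hptx : pvPt k t x = y := pv_pt_pair k x y hk hy.1 hy.2
    have hpty : pvPt k t y = x := by
      rw [htdef, show x + y = y + x by ring]
      exact pv_pt_pair k y x hk hx.1 hx.2
    have hcx : pvOdd0 (pvGc k x y nums) ≤ pvCell k t nums x := by
      rw [pvCell, hptx]; exact le_max_left _ _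
    have hcy : pvEven0 (pvGc k x y nums) ≤ pvCell k t nums y := by
      rw [pvCell, hpty]; exact le_max_right _ _
    have hG : pvGc k x y nums ≤ max (pvCell k t nums x) (pvCell k t nums y) := by
      rw [← pv_odd_even_max (pvGc k x y nums) (pv_gc_nonneg k x y nums)]
      exact max_le (le_trans hcx (le_max_left _ _)) (le_trans hcy (le_max_right _ _))
    have hcmA : pvCellMax k t nums ≤ A :=
      pv_le_fm_mem _ _ t 0 (by rw [PySem.List.mem_pyRange_one]; exact ⟨ht0, htk⟩)
    refine le_trans hG (le_trans (max_le ?_ ?_) hcmA)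
    · exact pv_le_fm_mem _ _ x 0 (by rw [PySem.List.mem_pyRange_one]; exact hx)
    · exact pv_le_fm_mem _ _ y 0 (by rw [PySem.List.mem_pyRange_one]; exact hy)

theorem pv_main_pos (nums : List Int) (k : Int) (hk : 0 < k) :
    maximumLength2 nums k = maximumLength2_alt nums k := by
  rw [pv_a_flat nums k hk, pv_bnew nums k, pv_bridge nums k hk]

-- ===== VERDICT (by name: the statement is the Claim_ definition above) =====
theorem maximumLength2_spec : Claim_equal_maximumLength2 := by
  intro nums k _ _
  unfold Spec_maximumLength2
  by_cases hk : 0 < k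
  · exact pv_main_pos nums k hk
  · have hnil : PySem.List.pyRange 0 k 1 = [] := PySem.List.pyRange_one_eq_nil (by omega)
    have hstep : ∀ st num, pvAStep k st num = st := by intro st num; simp [pvAStep, hnil]
    have hfix : ∀ (l : List Int) st, l.foldl (pvAStep k) st = st := by
      intro l; induction l with
      | nil => intro st; rfl
      | cons x l ih => intro st; rw [List.foldl_cons, hstep]; exact ih st
    simp [maximumLength2, maximumLength2_alt, hnil, hfix]
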